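-- pv_equiv track=rewrite | github.com/worldwidelaw/legal-sources | sources/BR/Planalto/bootstrap.py | _ato_range
-- ===== SOURCE A (Python) =====
-- def _ato_range(year: int) -> str:
--     """Get the Ato year range for Planalto URLs (4-year blocks starting 2000)."""
--     if year < 2000:
--         return ""
--     start = year - ((year - 2000) % 4) + 2000 if (year - 2000) % 4 != 0 else year
--     # Blocks: 2000-2002, 2003-2006, 2007-2010, 2011-2014, 2015-2018, 2019-2022, 2023-2026
--     ranges = [
--         (2000, 2002), (2003, 2006), (2007, 2010), (2011, 2014),
--         (2015, 2018), (2019, 2022), (2023, 2026), (2027, 2030),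
--     ]
--     for s, e in ranges:
--         if s <= year <= e:
--             return f"{s}-{e}"
--     return f"{year}-{year+3}"
-- ===== SOURCE B (Python) =====
-- def _ato_range(year: int) -> str:
--     """Get the Ato year range for Planalto URLs (4-year blocks starting 2000)."""
--     if year < 2000:
--         return ""
--     if year <= 2002:
--         return "2000-2002"
--     if year <= 2030:
--         s = 2003 + 4 * ((year - 2003) // 4)
--         return f"{s}-{s + 3}"
--     return f"{year}-{year + 3}"
-- ===== Notes on version B (the rewrite author's own statement) =====
-- stated objective: simpler
-- what changed: Replaced the linear scan over a hard-coded list of (start,end) blocks (plus a dead 'start' computation) with direct arithmetic: the aligned 4-year block start is computed as 2003 + 4*((year-2003)//4) for 2003..2030, with the 2000-2002 head block and the unaligned year..year+3 tail handled by two comparisons.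
import Mathlib
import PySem

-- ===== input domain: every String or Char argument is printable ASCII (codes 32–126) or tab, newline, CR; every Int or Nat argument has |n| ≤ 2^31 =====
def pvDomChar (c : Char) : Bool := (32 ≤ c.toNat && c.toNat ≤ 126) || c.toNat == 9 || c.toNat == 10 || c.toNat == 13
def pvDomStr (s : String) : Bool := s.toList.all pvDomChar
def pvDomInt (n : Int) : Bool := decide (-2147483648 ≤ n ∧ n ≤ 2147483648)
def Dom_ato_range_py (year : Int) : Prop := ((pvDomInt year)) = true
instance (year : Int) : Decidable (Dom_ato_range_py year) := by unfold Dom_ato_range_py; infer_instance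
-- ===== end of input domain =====

-- B replaces A's scan over the hard-coded block list with direct arithmetic on the year; same return value everywhere.

-- ===== PORT A =====
-- for s, e in ranges: if s <= year <= e: return f"{s}-{e}"  — else fall through
def atoFindRange (year : Int) : List (Int × Int) → Option String
  | [] => none
  | (s, e) :: rest =>
    if s ≤ year ∧ year ≤ e then some (PySem.Int.toStr s ++ "-" ++ PySem.Int.toStr e)
    else atoFindRange year rest

def ato_range_py (year : Int) : String :=
  if year < 2000 then ""
  else
    -- dead 'start' computation kept from A (unused, as in the Python)
    let _start : Int :=
      if PySem.Int.mod (year - 2000) 4 ≠ 0 then year - PySem.Int.mod (year - 2000) 4 + 2000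
      else year
    let ranges : List (Int × Int) :=
      [(2000, 2002), (2003, 2006), (2007, 2010), (2011, 2014),
       (2015, 2018), (2019, 2022), (2023, 2026), (2027, 2030)]
    match atoFindRange year ranges with
    | some r => r
    | none => PySem.Int.toStr year ++ "-" ++ PySem.Int.toStr (year + 3)

-- ===== PORT B =====
def ato_range_py_alt (year : Int) : String :=
  if year < 2000 then ""
  else if year ≤ 2002 then "2000-2002"
  else if year ≤ 2030 then
    let s := 2003 + 4 * PySem.Int.floordiv (year - 2003) 4
    PySem.Int.toStr s ++ "-" ++ PySem.Int.toStr (s + 3)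
  else PySem.Int.toStr year ++ "-" ++ PySem.Int.toStr (year + 3)

-- ===== PRECONDITION & SPEC =====
def Spec_ato_range_py (year : Int) (out : String) : Prop := out = ato_range_py_alt year
instance (year : Int) (out : String) : Decidable (Spec_ato_range_py year out) := by unfold Spec_ato_range_py; infer_instance

-- ===== CLAIM (what is proved, stated in full; the proofs are below) =====
def Claim_equal_ato_range_py : Prop := ∀ (year : Int), Dom_ato_range_py year → Spec_ato_range_py year (ato_range_py year)

-- ===== LEMMAS AND PROOFS =====

-- ===== VERDICT (by name: the statement is the Claim_ definition above) =====
theorem ato_range_py_spec : Claim_equal_ato_range_py := by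
  intro year _
  unfold Spec_ato_range_py ato_range_py ato_range_py_alt
  by_cases h1 : year < 2000
  · simp [h1]
  · by_cases h2 : year ≤ 2030
    · have hlo : 2000 ≤ year := by omega
      interval_cases year <;> decide
    · simp only [if_neg h1, atoFindRange]
      rw [if_neg (by omega), if_neg (by omega), if_neg (by omega), if_neg (by omega),
          if_neg (by omega), if_neg (by omega), if_neg (by omega), if_neg (by omega),
          if_neg (by omega), if_neg (by omega)]
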